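-- pv_equiv track=rewrite | github.com/LChanger/LeetCode | pdd/pro2.py | judge_type
-- ===== SOURCE A (Python) =====
-- def R(nums):
--     shang=nums[0]
--     xia=nums[1]
--     zuo=nums[2]
--     you=nums[3]
--     qian=nums[4]
--     hou=nums[5]
--     # 前后45不变
--     s=you
--     z=shang
--     x=zuo
--     y=xia
--     nums[0]=s
--     nums[2]=z
--     nums[1]=x
--     nums[3]=y
--
-- def U(nums):
--     shang=nums[0]
--     xia=nums[1]
--     zuo=nums[2]
--     you=nums[3]
--     qian=nums[4]
--     hou=nums[5]
--     # 左右23不变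
--     s=qian
--     q=xia
--     x=hou
--     h=shang
--     nums[0]=s
--     nums[4]=q
--     nums[1]=x
--     nums[5]=h
--
-- def Q(nums):
--     shang=nums[0]
--     xia=nums[1]
--     zuo=nums[2]
--     you=nums[3]
--     qian=nums[4]
--     hou=nums[5]
--     # 上下01不变
--     q=zuo
--     y=qian
--     h=you
--     z=hou
--     nums[4]=q
--     nums[3]=y
--     nums[5]=h
--     nums[2]=z
--
-- def judge_type(nums):
--     #把1放到上面
--     if nums[0]!=1:
--         index1=nums.index(1)
--         #下边
--         if index1==1:
--             U(nums)
--             U(nums)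
--         #在左边
--         elif index1==2:
--             R(nums)
--             R(nums)
--             R(nums)
--         #在右边
--         elif index1==3:
--             R(nums)
--         #在前边
--         elif index1==4:
--             U(nums)
--         #在后边
--         elif index1==5:
--             U(nums)
--             U(nums)
--             U(nums)
--     #最小的应该在左边
--     min_index=2
--     for i in range(3,6):
--         if nums[min_index]>nums[i]:
--             min_index=i
--     if min_index==3:
--         Q(nums)
--         Q(nums)
--     elif min_index==4:
--         Q(nums)
--         Q(nums)
--         Q(nums)
--     elif min_index==5:
--         Q(nums)
--     return nums
-- ===== SOURCE B (Python) =====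
-- # B: same two-phase normalization, but each branch's rotation sequence is replaced by
-- # one precomputed net permutation applied in a single slice assignment (mutates nums like A).
--
-- _PERM1 = {1: [1, 0, 2, 3, 5, 4],
--           2: [2, 3, 1, 0, 4, 5],
--           3: [3, 2, 0, 1, 4, 5],
--           4: [4, 5, 2, 3, 1, 0],
--           5: [5, 4, 2, 3, 0, 1]}
--
-- _PERM2 = {3: [0, 1, 3, 2, 5, 4],
--           4: [0, 1, 4, 5, 3, 2],
--           5: [0, 1, 5, 4, 2, 3]}
--
-- def judge_type(nums):
--     if nums[0] != 1:
--         p = _PERM1.get(nums.index(1))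
--         if p is not None:
--             nums[:6] = [nums[j] for j in p]
--     m = min(range(2, 6), key=lambda j: nums[j])
--     q = _PERM2.get(m)
--     if q is not None:
--         nums[:6] = [nums[j] for j in q]
--     return nums
-- ===== Notes on version B (the rewrite author's own statement) =====
-- stated objective: simpler
-- what changed: Each branch's chain of in-place R/U/Q rotation calls is replaced by one precomputed net permutation table per phase, applied in a single slice assignment, and the hand-written strict-'>' minimum loop by min(range(2,6), key=...).
import Mathlib
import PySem

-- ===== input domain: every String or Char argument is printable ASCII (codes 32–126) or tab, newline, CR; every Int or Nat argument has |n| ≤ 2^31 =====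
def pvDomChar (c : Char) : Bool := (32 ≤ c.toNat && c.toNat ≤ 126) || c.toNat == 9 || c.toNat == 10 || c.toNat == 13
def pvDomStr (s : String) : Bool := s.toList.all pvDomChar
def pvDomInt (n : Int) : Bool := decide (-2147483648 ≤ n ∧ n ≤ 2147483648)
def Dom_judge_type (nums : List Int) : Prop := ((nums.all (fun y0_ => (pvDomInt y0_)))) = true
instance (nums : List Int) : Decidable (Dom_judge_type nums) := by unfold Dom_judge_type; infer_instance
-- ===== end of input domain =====

-- B replaces each branch's chain of R/U/Q rotation calls by one precomputed net permutation
-- applied in a single pass (objective: simpler). Both A and B mutate `nums` in place in Python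
-- (the same observable mutation of the first six slots); the theorems are about the return value.

-- ===== PORT A =====
-- literal transliteration of R/U/Q (the unused locals of the Python are dropped; each
-- nums[i] read is PySem.List.pyGetD — in-range under Pre_, where Python cannot raise)
def pvR (nums : List Int) : List Int :=
  let shang := PySem.List.pyGetD nums 0 0
  let xia   := PySem.List.pyGetD nums 1 0
  let zuo   := PySem.List.pyGetD nums 2 0
  let you   := PySem.List.pyGetD nums 3 0
  ((((nums.set 0 you).set 2 shang).set 1 zuo).set 3 xia)

def pvU (nums : List Int) : List Int :=
  let shang := PySem.List.pyGetD nums 0 0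
  let xia   := PySem.List.pyGetD nums 1 0
  let qian  := PySem.List.pyGetD nums 4 0
  let hou   := PySem.List.pyGetD nums 5 0
  ((((nums.set 0 qian).set 4 xia).set 1 hou).set 5 shang)

def pvQ (nums : List Int) : List Int :=
  let zuo  := PySem.List.pyGetD nums 2 0
  let you  := PySem.List.pyGetD nums 3 0
  let qian := PySem.List.pyGetD nums 4 0
  let hou  := PySem.List.pyGetD nums 5 0
  ((((nums.set 4 zuo).set 3 qian).set 5 you).set 2 hou)

-- phase 1 of A: put the 1 on top (the `none` branch is Python's ValueError, excluded by Pre_)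
def pvAphase1 (nums : List Int) : List Int :=
  if PySem.List.pyGetD nums 0 0 ≠ 1 then
    match PySem.List.index? nums 1 with
    | none => nums
    | some index1 =>
      if index1 = 1 then pvU (pvU nums)
      else if index1 = 2 then pvR (pvR (pvR nums))
      else if index1 = 3 then pvR nums
      else if index1 = 4 then pvU nums
      else if index1 = 5 then pvU (pvU (pvU nums))
      else nums
  else nums

-- phase 2 of A: the `for i in range(3,6)` minimum scan, then the Q-chain
def pvAphase2 (nums : List Int) : List Int :=
  let min_index := (PySem.List.pyRange 3 6 1).foldl
    (fun mi i => if PySem.List.pyGetD nums mi 0 > PySem.List.pyGetD nums i 0 then i else mi) 2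
  if min_index = 3 then pvQ (pvQ nums)
  else if min_index = 4 then pvQ (pvQ (pvQ nums))
  else if min_index = 5 then pvQ nums
  else nums

def judge_type (nums : List Int) : List Int := pvAphase2 (pvAphase1 nums)

-- ===== PORT B =====
def pvPerm1 : PySem.Dict Int (List Int) :=
  PySem.Dict.mk [(1, [1, 0, 2, 3, 5, 4]),
                 (2, [2, 3, 1, 0, 4, 5]),
                 (3, [3, 2, 0, 1, 4, 5]),
                 (4, [4, 5, 2, 3, 1, 0]),
                 (5, [5, 4, 2, 3, 0, 1])]

def pvPerm2 : PySem.Dict Int (List Int) :=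
  PySem.Dict.mk [(3, [0, 1, 3, 2, 5, 4]),
                 (4, [0, 1, 4, 5, 3, 2]),
                 (5, [0, 1, 5, 4, 2, 3])]

-- nums[:6] = [nums[j] for j in p]
def pvApply (p : List Int) (nums : List Int) : List Int :=
  (p.map (fun j => PySem.List.pyGetD nums j 0)) ++ nums.drop 6

def pvBphase1 (nums : List Int) : List Int :=
  if PySem.List.pyGetD nums 0 0 ≠ 1 then
    match PySem.List.index? nums 1 with
    | none => nums
    | some i =>
      match PySem.Dict.get? pvPerm1 (i : Int) with
      | some p => pvApply p nums
      | none => nums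
  else nums

def pvBphase2 (nums : List Int) : List Int :=
  match PySem.List.min? (PySem.List.pyRange 2 6 1) (fun j => PySem.List.pyGetD nums j 0) with
  | none => nums   -- unreachable: range(2,6) is nonempty
  | some m =>
    match PySem.Dict.get? pvPerm2 m with
    | some q => pvApply q nums
    | none => nums

def judge_type_alt (nums : List Int) : List Int := pvBphase2 (pvBphase1 nums)

-- ===== PRECONDITION & SPEC =====
-- Pre_ excludes exactly the inputs where the Python A raises: lists shorter than 6
-- (IndexError in R/U/Q or the min scan) and lists whose head is not 1 and which do not
-- contain 1 at all (ValueError from nums.index(1)).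
def Pre_judge_type (nums : List Int) : Prop :=
  6 ≤ nums.length ∧ (PySem.List.pyGetD nums 0 0 = 1 ∨ (1 : Int) ∈ nums)
instance (nums : List Int) : Decidable (Pre_judge_type nums) := by unfold Pre_judge_type; infer_instance

def pvWitness_judge_type : List Int := [2, 5, 3, 1, 4, 6]

def Spec_judge_type (nums : List Int) (out : List Int) : Prop := out = judge_type_alt nums
instance (nums : List Int) (out : List Int) : Decidable (Spec_judge_type nums out) := by unfold Spec_judge_type; infer_instance

-- ===== CLAIM (what is proved, stated in full; the proofs are below) =====
def Claim_equal_judge_type : Prop := ∀ (nums : List Int), Dom_judge_type nums → Pre_judge_type nums → Spec_judge_type nums (judge_type nums)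

-- ===== LEMMAS AND PROOFS =====

lemma pv_shape6 (nums : List Int) (h : 6 ≤ nums.length) :
    ∃ a b c d e f r, nums = a :: b :: c :: d :: e :: f :: r := by
  rcases nums with _ | ⟨a, nums⟩; · simp at h
  rcases nums with _ | ⟨b, nums⟩; · simp at h
  rcases nums with _ | ⟨c, nums⟩; · simp at h
  rcases nums with _ | ⟨d, nums⟩; · simp at h
  rcases nums with _ | ⟨e, nums⟩; · simp at h
  rcases nums with _ | ⟨f, nums⟩; · simp at h
  exact ⟨a, b, c, d, e, f, nums, rfl⟩

lemma pv_fold_mem (l : List Int) (m : Int) (key : Int → Int) :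
    l.foldl (fun mi i => if key mi > key i then i else mi) m ∈ m :: l := by
  induction l generalizing m with
  | nil => simp
  | cons x l ih =>
    simp only [List.foldl]
    by_cases h : key m > key x
    · simp only [if_pos h]
      exact List.mem_cons_of_mem _ (ih x)
    · simp only [if_neg h]
      rcases List.mem_cons.1 (ih m) with h' | h'
      · exact List.mem_cons.2 (Or.inl h')
      · exact List.mem_cons_of_mem _ (List.mem_cons_of_mem _ h')

-- Python's min(range(2,6), key=…) is A's strict-'>' first-minimum scan
lemma pv_min_eq (L : List Int) :
    PySem.List.min? [2, 3, 4, 5] (fun j => PySem.List.pyGetD L j 0)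
    = some ([3, 4, 5].foldl
        (fun mi i => if PySem.List.pyGetD L mi 0 > PySem.List.pyGetD L i 0 then i else mi) 2) := by
  unfold PySem.List.min?
  simp only [List.foldl, gt_iff_lt]
  split_ifs <;> try simp_all
  all_goals split_ifs <;> (try simp_all) <;> (try omega)

-- the two phase-2 computations agree on every list (of cons-depth 6)
lemma pv_phase2_eq (a b c d e f : Int) (r : List Int) :
    pvAphase2 (a :: b :: c :: d :: e :: f :: r) = pvBphase2 (a :: b :: c :: d :: e :: f :: r) := by
  have hr3 : PySem.List.pyRange 3 6 1 = [3, 4, 5] := by decide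
  have hr2 : PySem.List.pyRange 2 6 1 = [2, 3, 4, 5] := by decide
  simp only [pvAphase2, pvBphase2, hr3, hr2, pv_min_eq]
  have hmem := pv_fold_mem [3, 4, 5] 2
    (fun j => PySem.List.pyGetD (a :: b :: c :: d :: e :: f :: r) j 0)
  simp only [List.mem_cons, List.not_mem_nil, or_false] at hmem
  generalize hmi : [3, 4, 5].foldl (fun mi i =>
      if PySem.List.pyGetD (a :: b :: c :: d :: e :: f :: r) mi 0 >
         PySem.List.pyGetD (a :: b :: c :: d :: e :: f :: r) i 0 then i else mi) 2 = mi at *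
  rcases hmem with h | h | h | h <;> subst h <;>
    simp [pvQ, pvApply, pvPerm2, PySem.Dict.get?, PySem.List.pyGetD_ofNat', List.set, List.getD]

-- phase 1: both versions rotate the 1 to the top in the same way
lemma pv_phase1_eq (a b c d e f : Int) (r : List Int)
    (h : a = 1 ∨ (1 : Int) ∈ (a :: b :: c :: d :: e :: f :: r)) :
    ∃ a' b' c' d' e' f',
      pvAphase1 (a :: b :: c :: d :: e :: f :: r) = a' :: b' :: c' :: d' :: e' :: f' :: r
      ∧ pvBphase1 (a :: b :: c :: d :: e :: f :: r) = a' :: b' :: c' :: d' :: e' :: f' :: r := by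
  have h0 : PySem.List.pyGetD (a :: b :: c :: d :: e :: f :: r) 0 0 = a := by
    simp [PySem.List.pyGetD_ofNat']
  by_cases ha : a = 1
  · exact ⟨a, b, c, d, e, f,
      by simp [pvAphase1, h0, ha], by simp [pvBphase1, h0, ha]⟩
  · by_cases hb : b = 1
    · subst hb
      have hidx : List.idxOf? (1 : Int) (a :: 1 :: c :: d :: e :: f :: r) = some 1 := by
        simp [List.idxOf?, List.findIdx?_cons, ha]
      refine ⟨1, a, c, d, f, e, ?_, ?_⟩ <;>
        simp [pvAphase1, pvBphase1, h0, ha, PySem.List.index?, hidx, pvU, pvR, pvPerm1,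
          PySem.Dict.get?, pvApply, List.set, PySem.List.pyGetD_ofNat', List.getD]
    · by_cases hc : c = 1
      · subst hc
        have hidx : List.idxOf? (1 : Int) (a :: b :: 1 :: d :: e :: f :: r) = some 2 := by
          simp [List.idxOf?, List.findIdx?_cons, ha, hb]
        refine ⟨1, d, b, a, e, f, ?_, ?_⟩ <;>
          simp [pvAphase1, pvBphase1, h0, ha, hb, PySem.List.index?, hidx, pvU, pvR, pvPerm1,
            PySem.Dict.get?, pvApply, List.set, PySem.List.pyGetD_ofNat', List.getD]
      · by_cases hd : d = 1
        · subst hd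
          have hidx : List.idxOf? (1 : Int) (a :: b :: c :: 1 :: e :: f :: r) = some 3 := by
            simp [List.idxOf?, List.findIdx?_cons, ha, hb, hc]
          refine ⟨1, c, a, b, e, f, ?_, ?_⟩ <;>
            simp [pvAphase1, pvBphase1, h0, ha, hb, hc, PySem.List.index?, hidx, pvU, pvR,
              pvPerm1, PySem.Dict.get?, pvApply, List.set, PySem.List.pyGetD_ofNat', List.getD]
        · by_cases he : e = 1
          · subst he
            have hidx : List.idxOf? (1 : Int) (a :: b :: c :: d :: 1 :: f :: r) = some 4 := by
              simp [List.idxOf?, List.findIdx?_cons, ha, hb, hc, hd]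
            refine ⟨1, f, c, d, b, a, ?_, ?_⟩ <;>
              simp [pvAphase1, pvBphase1, h0, ha, hb, hc, hd, PySem.List.index?, hidx, pvU,
                pvR, pvPerm1, PySem.Dict.get?, pvApply, List.set, PySem.List.pyGetD_ofNat',
                List.getD]
          · by_cases hf : f = 1
            · subst hf
              have hidx : List.idxOf? (1 : Int) (a :: b :: c :: d :: e :: 1 :: r) = some 5 := by
                simp [List.idxOf?, List.findIdx?_cons, ha, hb, hc, hd, he]
              refine ⟨1, e, c, d, a, b, ?_, ?_⟩ <;>
                simp [pvAphase1, pvBphase1, h0, ha, hb, hc, hd, he, PySem.List.index?, hidx,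
                  pvU, pvR, pvPerm1, PySem.Dict.get?, pvApply, List.set,
                  PySem.List.pyGetD_ofNat', List.getD]
            · -- the 1 sits beyond the first six slots: neither version rotates
              have hr1 : (1 : Int) ∈ r := by
                rcases h with h | h
                · exact absurd h ha
                · simp only [List.mem_cons] at h
                  rcases h with h | h | h | h | h | h | h <;>
                    first
                      | exact absurd h.symm ha
                      | exact absurd h.symm hb
                      | exact absurd h.symm hc
                      | exact absurd h.symm hd
                      | exact absurd h.symm he
                      | exact absurd h.symm hf
                      | exact h
              obtain ⟨k, hk⟩ := Option.isSome_iff_exists.1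
                ((PySem.List.index?_isSome_iff r 1).2 hr1)
              have hidx : PySem.List.index? (a :: b :: c :: d :: e :: f :: r) 1
                  = some (k + 6) := by
                rw [PySem.List.index?_cons_of_ne _ ha, PySem.List.index?_cons_of_ne _ hb,
                  PySem.List.index?_cons_of_ne _ hc, PySem.List.index?_cons_of_ne _ hd,
                  PySem.List.index?_cons_of_ne _ he, PySem.List.index?_cons_of_ne _ hf, hk]
                simp only [Option.map_some]
              refine ⟨a, b, c, d, e, f, ?_, ?_⟩
              · simp only [pvAphase1, h0, hidx]
                simp [ha, show ¬ (k + 6 = 1) from by omega, show ¬ (k + 6 = 2) from by omega,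
                  show ¬ (k + 6 = 3) from by omega, show ¬ (k + 6 = 4) from by omega,
                  show ¬ (k + 6 = 5) from by omega]
              · simp only [pvBphase1, h0, hidx]
                simp [pvPerm1, PySem.Dict.get?, ha, Nat.cast_add,
                  show ¬ ((1 : Int) = ((k : Int) + 6)) from by omega,
                  show ¬ ((2 : Int) = ((k : Int) + 6)) from by omega,
                  show ¬ ((3 : Int) = ((k : Int) + 6)) from by omega,
                  show ¬ ((4 : Int) = ((k : Int) + 6)) from by omega,
                  show ¬ ((5 : Int) = ((k : Int) + 6)) from by omega]

-- ===== VERDICT (by name: the statement is the Claim_ definition above) =====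
theorem judge_type_spec : Claim_equal_judge_type := by
  intro nums _ hpre
  obtain ⟨hlen, hone⟩ := hpre
  obtain ⟨a, b, c, d, e, f, r, rfl⟩ := pv_shape6 nums hlen
  have hone' : a = 1 ∨ (1 : Int) ∈ (a :: b :: c :: d :: e :: f :: r) := by
    rcases hone with h | h
    · left; simpa [PySem.List.pyGetD_ofNat'] using h
    · right; exact h
  show judge_type _ = judge_type_alt _
  unfold judge_type judge_type_alt
  obtain ⟨a', b', c', d', e', f', hA, hB⟩ := pv_phase1_eq a b c d e f r hone'
  rw [hA, hB]
  exact pv_phase2_eq a' b' c' d' e' f' r
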